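-- pv_equiv track=rewrite | github.com/RemigiuszMMarciniak/PythonProjectDNAComparisionAndVisualization | PythonProjectDNARNAProteinComparisionAndVisualization/main.py | sum_diag
-- ===== SOURCE A (Python) =====
-- def sum_diag(matrix):
--     counter = 0
--     for i in range(len(matrix)):
--         for j in range(len(matrix[i])):
--             if i == j:
--                 if matrix[i][j] == 1:
--                     counter += 1
--     return counter
-- ===== SOURCE B (Python) =====
-- def sum_diag(matrix):
--     # Direct diagonal access per row instead of scanning every entry: O(n).
--     return sum(1 for i, row in enumerate(matrix) if i < len(row) and row[i] == 1)
-- ===== Notes on version B (the rewrite author's own statement) =====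
-- stated objective: simpler
-- what changed: Replaces the nested loops that scan every matrix entry (testing i == j) with a one-line single pass over enumerate(matrix) that reads row[i] directly with a bounds check.
import Mathlib
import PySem

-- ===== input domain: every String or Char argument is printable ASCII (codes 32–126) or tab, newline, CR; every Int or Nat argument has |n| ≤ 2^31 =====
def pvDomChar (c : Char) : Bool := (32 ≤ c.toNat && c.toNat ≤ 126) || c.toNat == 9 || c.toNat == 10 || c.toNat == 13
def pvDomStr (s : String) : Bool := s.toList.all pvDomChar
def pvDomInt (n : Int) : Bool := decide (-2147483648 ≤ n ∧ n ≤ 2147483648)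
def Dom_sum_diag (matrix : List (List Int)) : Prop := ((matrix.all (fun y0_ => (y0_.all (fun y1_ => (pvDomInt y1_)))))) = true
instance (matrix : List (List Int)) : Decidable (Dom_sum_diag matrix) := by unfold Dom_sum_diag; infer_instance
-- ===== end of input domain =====

-- B replaces A's nested full scan of every entry (testing i == j) by a one-line pass over enumerate(matrix) reading row[i] directly per row (objective: simpler).

-- ===== PORT A =====
-- nested loops over all entries, counting diagonal 1s
def sum_diag (matrix : List (List Int)) : Int :=
  (PySem.List.pyRange 0 matrix.length 1).foldl
    (fun counter i =>
      let row := PySem.List.pyGetD matrix i []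
      (PySem.List.pyRange 0 row.length 1).foldl
        (fun counter j =>
          if i = j then
            (if PySem.List.pyGetD row j 0 = 1 then counter + 1 else counter)
          else counter)
        counter)
    0

-- ===== PORT B =====
-- one pass over the rows with their index (Python's enumerate-generator sum)
def pvAltGo (i : Nat) : List (List Int) → Int
  | [] => 0
  | row :: rest =>
      (if h : i < row.length then (if row[i] = 1 then (1 : Int) else 0) else 0) + pvAltGo (i + 1) rest

def sum_diag_alt (matrix : List (List Int)) : Int := pvAltGo 0 matrix

-- ===== PRECONDITION & SPEC =====
def Spec_sum_diag (matrix : List (List Int)) (out : Int) : Prop := out = sum_diag_alt matrix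
instance (matrix : List (List Int)) (out : Int) : Decidable (Spec_sum_diag matrix out) := by unfold Spec_sum_diag; infer_instance

-- ===== CLAIM (what is proved, stated in full; the proofs are below) =====
def Claim_equal_sum_diag : Prop := ∀ (matrix : List (List Int)), Dom_sum_diag matrix → Spec_sum_diag matrix (sum_diag matrix)

-- ===== LEMMAS AND PROOFS =====

-- contribution of one row at outer index i (A returns 1 for row i iff the diagonal entry exists and is 1)
def pvDelta (i : Int) (row : List Int) : Int :=
  if 0 ≤ i ∧ i < (row.length : Int) ∧ PySem.List.pyGetD row i 0 = 1 then 1 else 0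

-- A's inner loop over a row adds exactly pvDelta
theorem pv_inner_fold (row : List Int) (i : Int) (n : Nat) (c : Int) :
    (PySem.List.pyRange 0 (n : Int) 1).foldl
      (fun counter j =>
        if i = j then
          (if PySem.List.pyGetD row j 0 = 1 then counter + 1 else counter)
        else counter) c
    = c + (if 0 ≤ i ∧ i < (n : Int) ∧ PySem.List.pyGetD row i 0 = 1 then 1 else 0) := by
  induction n generalizing c with
  | zero => simp; omega
  | succ n ih =>
      have h : ((n : Int) + 1) = (n : Int) + 1 := rfl
      have hsplit : PySem.List.pyRange 0 ((n : Int) + 1) 1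
          = PySem.List.pyRange 0 (n : Int) 1 ++ [(n : Int)] := by
        exact PySem.List.pyRange_one_succ_right (by positivity)
      push_cast
      rw [hsplit, List.foldl_append, ih]
      simp only [List.foldl_cons, List.foldl_nil]
      by_cases hi : i = (n : Int)
      · subst hi
        split_ifs with h1 h2 h3 h4 <;> push_cast at * <;> omega
      · split_ifs with h1 h2 h3 <;> push_cast at * <;> omega

-- B's pass over enumerated rows
theorem pv_enum_fold (rest : List (List Int)) (s : Nat) (c : Int) :
    (PySem.List.enumerate rest (s : Int)).foldl (fun c p => c + pvDelta p.1 p.2) c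
    = c + pvAltGo s rest := by
  induction rest generalizing s c with
  | nil => simp [PySem.List.enumerate_nil, pvAltGo]
  | cons row rest ih =>
      rw [PySem.List.enumerate_cons, List.foldl_cons]
      have : ((s : Int) + 1) = ((s + 1 : Nat) : Int) := by push_cast; ring
      rw [this, ih]
      have hd : pvDelta (s : Int) row
          = (if h : s < row.length then (if row[s] = 1 then (1 : Int) else 0) else 0) := by
        unfold pvDelta
        by_cases hs : s < row.length
        · have hg : PySem.List.pyGetD row (s : Int) 0 = row[s] := by
            rw [PySem.List.pyGetD_natCast]
            exact List.getD_eq_getElem row 0 hs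
          rw [dif_pos hs, hg]
          by_cases hv : row[s] = 1
          · rw [if_pos hv, if_pos ⟨Int.natCast_nonneg s, by exact_mod_cast hs, hv⟩]
          · rw [if_neg hv, if_neg (fun h => hv h.2.2)]
        · rw [dif_neg hs, if_neg (by omega)]
      rw [hd]
      simp only [pvAltGo]
      ring

-- ===== VERDICT (by name: the statement is the Claim_ definition above) =====
theorem sum_diag_spec : Claim_equal_sum_diag := by
  intro matrix _
  unfold Spec_sum_diag sum_diag sum_diag_alt
  have hbody : (fun (counter : Int) (i : Int) =>
      let row := PySem.List.pyGetD matrix i []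
      (PySem.List.pyRange 0 (row.length : Int) 1).foldl
        (fun counter j =>
          if i = j then
            (if PySem.List.pyGetD row j 0 = 1 then counter + 1 else counter)
          else counter) counter)
      = fun (counter : Int) (i : Int) => counter + pvDelta i (PySem.List.pyGetD matrix i []) := by
    funext counter i
    show (PySem.List.pyRange 0 ((PySem.List.pyGetD matrix i []).length : Int) 1).foldl _ counter = _
    rw [pv_inner_fold]
    rfl
  rw [hbody]
  have h0 := pv_enum_fold matrix 0 0
  rw [show ((0 : Nat) : Int) = 0 from rfl,
      PySem.List.enumerate_eq_map_pyRange matrix ([] : List Int), List.foldl_map] at h0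
  simpa using h0
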